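-- pv_equiv track=rewrite | github.com/inmonim/algorithm | 백준/Silver/22871. 징검다리 건너기 （large）/징검다리 건너기 （large）.py | min_k_dp
-- ===== SOURCE A (Python) =====
-- def min_k_dp(A):
--     N = len(A)
--     dp = [float('inf')] * N
--     dp[0] = 0
--
--     for i in range(1, N):
--         for j in range(i):
--             cost = (i - j) * (1 + abs(A[i] - A[j]))
--             dp[i] = min(dp[i], max(dp[j], cost))
--
--     return dp[N - 1]
-- ===== SOURCE B (Python) =====
-- def min_k_dp(A):
--     n = len(A)
--
--     def feasible(k):
--         reach = [True]
--         for i in range(1, n):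
--             reach.append(any(reach[j] and (i - j) * (1 + abs(A[i] - A[j])) <= k
--                              for j in range(i)))
--         return reach[-1]
--
--     lo, hi = 0, (n - 1) * (1 + abs(A[-1] - A[0]))
--     while lo < hi:
--         mid = (lo + hi) // 2
--         if feasible(mid):
--             hi = mid
--         else:
--             lo = mid + 1
--     return lo
-- ===== Notes on version B (the rewrite author's own statement) =====
-- stated objective: alternative
-- what changed: Replaces the O(n^2) minimax DP table by a binary search on the answer k combined with a forward reachability check that only asks whether the last stone is reachable using jumps of cost at most k.
import Mathlib
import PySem

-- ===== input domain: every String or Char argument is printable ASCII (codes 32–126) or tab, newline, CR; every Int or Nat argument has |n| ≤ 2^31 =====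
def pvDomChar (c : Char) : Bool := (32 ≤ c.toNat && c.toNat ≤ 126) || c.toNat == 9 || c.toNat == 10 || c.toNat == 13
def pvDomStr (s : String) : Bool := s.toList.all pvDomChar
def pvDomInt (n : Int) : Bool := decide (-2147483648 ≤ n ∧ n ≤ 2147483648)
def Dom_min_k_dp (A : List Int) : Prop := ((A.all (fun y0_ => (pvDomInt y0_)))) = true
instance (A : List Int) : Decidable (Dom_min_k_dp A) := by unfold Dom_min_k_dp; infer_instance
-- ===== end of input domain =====

-- B replaces A's O(n^2) minimax DP by a binary search on the answer with a reachability check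
-- (an alternative algorithm of similar cost, not claimed faster).

-- ===== PORT A =====
-- float('inf') is modeled as `none` (Option Int); `pvOMin`/`pvOMax` are Python's min/max with +inf.
def pvOMin (a b : Option Int) : Option Int :=
  match a, b with
  | none, y => y
  | some x, none => some x
  | some x, some y => some (min x y)

def pvOMax (a : Option Int) (c : Int) : Option Int :=
  match a with
  | none => none
  | some x => some (max x c)

-- cost = (i - j) * (1 + abs(A[i] - A[j])); both ports index with i, j always in range,
-- so `List.getD` is exact for Python's A[i].
def pvCost (A : List Int) (i j : Nat) : Int :=
  ((i : Int) - (j : Int)) * (1 + |A.getD i 0 - A.getD j 0|)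

-- one iteration of A's outer loop: dp[i] = min over j < i of max(dp[j], cost) (dp[i] read/written in place)
def pvStepA (A : List Int) (dp : List (Option Int)) (i : Nat) : List (Option Int) :=
  dp.set i ((List.range i).foldl
    (fun acc j => pvOMin acc (pvOMax (dp.getD j none) (pvCost A i j))) (dp.getD i none))

-- range(1, N) = List.range' 1 (N-1); dp[N-1] is finite whenever N ≥ 1 (the `.getD 0` is never taken there)
def min_k_dp (A : List Int) : Int :=
  let N := A.length
  let dp0 := (List.replicate N (none : Option Int)).set 0 (some 0)
  let dp := (List.range' 1 (N - 1)).foldl (pvStepA A) dp0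
  ((dp.getD (N - 1) none).getD 0)

-- ===== PORT B =====
-- feasible(k): forward reachability with only jumps of cost ≤ k allowed; returns reach[-1]
def pvFeasible (A : List Int) (k : Int) : Bool :=
  let n := A.length
  let reach := (List.range' 1 (n - 1)).foldl
    (fun r i => r ++ [(List.range i).any
      (fun j => r.getD j false && decide (pvCost A i j ≤ k))]) [true]
  reach.getLast?.getD false

-- the while-loop of B's binary search; mid = (lo + hi) // 2
def pvBSearch (A : List Int) (lo hi : Int) : Int :=
  if h : lo < hi then
    let mid := PySem.Int.floordiv (lo + hi) 2
    if pvFeasible A mid then pvBSearch A lo mid else pvBSearch A (mid + 1) hi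
  else lo
termination_by (hi - lo).toNat
decreasing_by
  · have h1 := PySem.Int.floordiv_two_mid_bounds (le_of_lt h)
    have h2 : PySem.Int.floordiv (lo + hi) 2 < hi := by
      rw [PySem.Int.floordiv_lt_iff_lt_mul (by omega)]; omega
    omega
  · have h1 := PySem.Int.floordiv_two_mid_bounds (le_of_lt h)
    omega

-- hi = (n - 1) * (1 + abs(A[-1] - A[0])); for n ≥ 1, A[-1] = A[n-1]
def min_k_dp_alt (A : List Int) : Int :=
  let n := A.length
  let hi := ((n : Int) - 1) * (1 + |A.getD (n - 1) 0 - A.getD 0 0|)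
  pvBSearch A 0 hi

-- ===== PRECONDITION & SPEC =====
-- Pre_ excludes only the empty list, on which Python A raises IndexError (dp[0] = 0 on an empty dp).
def Pre_min_k_dp (A : List Int) : Prop := A ≠ []
instance (A : List Int) : Decidable (Pre_min_k_dp A) := by unfold Pre_min_k_dp; infer_instance
def pvWitness_min_k_dp : List Int := ([3, 1, 2])

def Spec_min_k_dp (A : List Int) (out : Int) : Prop := out = min_k_dp_alt A
instance (A : List Int) (out : Int) : Decidable (Spec_min_k_dp A out) := by unfold Spec_min_k_dp; infer_instance

-- ===== CLAIM (what is proved, stated in full; the proofs are below) =====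
def Claim_equal_min_k_dp : Prop := ∀ (A : List Int), Dom_min_k_dp A → Pre_min_k_dp A → Spec_min_k_dp A (min_k_dp A)

-- ===== LEMMAS AND PROOFS =====

-- the minimax value of A's dp: Dv A i = min over j < i of max (Dv A j) (cost i j), Dv A 0 = 0
def Dv (A : List Int) : Nat → Int
  | 0 => 0
  | i + 1 =>
    (((List.range (i + 1)).attach.map
        (fun j => max (Dv A j.1) (pvCost A (i + 1) j.1))).min?).getD 0
decreasing_by exact List.mem_range.mp j.2

theorem Dv_succ (A : List Int) (i : Nat) :
    Dv A (i + 1) = (((List.range (i + 1)).map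
      (fun j => max (Dv A j) (pvCost A (i + 1) j))).min?).getD 0 := by
  rw [Dv]; congr 1; rw [List.map_attach_eq_pmap]; simp [List.pmap_eq_map]

theorem min?_of_ne_nil {l : List Int} (h : l ≠ []) : ∃ m, l.min? = some m := by
  cases l with
  | nil => exact absurd rfl h
  | cons a t => exact ⟨t.foldl min a, rfl⟩

theorem Dv_succ_eq (A : List Int) (i : Nat) :
    ∃ m, ((List.range (i + 1)).map
      (fun j => max (Dv A j) (pvCost A (i + 1) j))).min? = some m ∧ Dv A (i + 1) = m := by
  obtain ⟨m, hm⟩ := min?_of_ne_nil (l := (List.range (i + 1)).map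
      (fun j => max (Dv A j) (pvCost A (i + 1) j))) (by simp)
  exact ⟨m, hm, by rw [Dv_succ, hm]; rfl⟩

theorem pvCost_nonneg (A : List Int) (i j : Nat) (h : j ≤ i) : 0 ≤ pvCost A i j := by
  unfold pvCost
  have h1 : (0:Int) ≤ (i : Int) - (j : Int) := by omega
  have h2 : (0:Int) ≤ 1 + |A.getD i 0 - A.getD j 0| := by positivity
  positivity

theorem Dv_nonneg (A : List Int) : ∀ i, 0 ≤ Dv A i := by
  intro i
  induction i using Nat.strong_induction_on with
  | _ i ih =>
    cases i with
    | zero => simp [Dv]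
    | succ t =>
      obtain ⟨m, hm, he⟩ := Dv_succ_eq A t
      rw [he]
      obtain ⟨hmem, -⟩ := List.min?_eq_some_iff.mp hm
      obtain ⟨j, hj, hjm⟩ := List.mem_map.mp hmem
      have hjlt := List.mem_range.mp hj
      have := ih j (by omega)
      rw [← hjm]
      exact le_trans this (le_max_left _ _)

-- ---------- A side: the dp fold computes Dv ----------

def dpVec (A : List Int) (t : Nat) : List (Option Int) :=
  (List.range A.length).map (fun i => if i < t then some (Dv A i) else none)

theorem dpVec_getD_lt (A : List Int) (t j : Nat) (hj : j < t) (hjN : j < A.length) :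
    (dpVec A t).getD j none = some (Dv A j) := by
  unfold dpVec
  rw [List.getD_eq_getElem?_getD, List.getElem?_map, List.getElem?_range hjN]
  simp [hj]

theorem dpVec_getD_ge (A : List Int) (t j : Nat) (hj : t ≤ j) :
    (dpVec A t).getD j none = none := by
  unfold dpVec
  rw [List.getD_eq_getElem?_getD, List.getElem?_map]
  by_cases hjN : j < A.length
  · rw [List.getElem?_range hjN]
    simp [Nat.not_lt.mpr hj]
  · rw [List.getElem?_eq_none (by simpa using Nat.not_lt.mp hjN)]
    rfl

theorem foldA_some (f : Nat → Int) :
    ∀ (l : List Nat) (a : Int),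
      l.foldl (fun acc j => pvOMin acc (some (f j))) (some a) = some ((l.map f).foldl min a) := by
  intro l
  induction l with
  | nil => intro a; rfl
  | cons x t ih =>
    intro a
    rw [List.foldl_cons, List.map_cons, List.foldl_cons]
    exact ih (min a (f x))

theorem foldA_none (f : Nat → Int) (l : List Nat) :
    l.foldl (fun acc j => pvOMin acc (some (f j))) none = (l.map f).min? := by
  cases l with
  | nil => rfl
  | cons x t =>
    rw [List.foldl_cons, List.map_cons]
    show List.foldl _ (some (f x)) t = _
    rw [foldA_some]
    simp [List.min?]

theorem stepA_dpVec (A : List Int) (m : Nat) (hm : m + 1 < A.length) :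
    pvStepA A (dpVec A (m + 1)) (m + 1) = dpVec A (m + 2) := by
  unfold pvStepA
  have hgetI : (dpVec A (m + 1)).getD (m + 1) none = none := dpVec_getD_ge A (m + 1) (m + 1) le_rfl
  rw [hgetI]
  have hbody : (List.range (m + 1)).foldl
      (fun acc j => pvOMin acc (pvOMax ((dpVec A (m + 1)).getD j none) (pvCost A (m + 1) j))) none
      = (List.range (m + 1)).foldl
      (fun acc j => pvOMin acc (some (max (Dv A j) (pvCost A (m + 1) j)))) none := by
    apply PySem.List.foldl_congr_mem
    intro acc j hj
    have hjlt := List.mem_range.mp hj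
    rw [dpVec_getD_lt A (m + 1) j hjlt (by omega)]
    rfl
  rw [hbody, foldA_none]
  obtain ⟨v, hv, he⟩ := Dv_succ_eq A m
  rw [hv, ← he]
  apply List.ext_getElem
  · simp [dpVec]
  · intro i h1 h2
    have hiN : i < A.length := by simpa [dpVec] using h2
    rw [List.getElem_set]
    unfold dpVec
    simp only [List.getElem_map, List.getElem_range]
    split_ifs with hie h3 h4 <;>
      first
        | rfl
        | omega
        | (subst hie; simp)

theorem dpA_fold (A : List Int) (hN : 0 < A.length) :
    ∀ m, m < A.length →
      (List.range' 1 m).foldl (pvStepA A)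
        ((List.replicate A.length (none : Option Int)).set 0 (some 0)) = dpVec A (m + 1) := by
  have hbase : (List.replicate A.length (none : Option Int)).set 0 (some 0) = dpVec A 1 := by
    apply List.ext_getElem
    · simp [dpVec]
    · intro i h1 h2
      rw [List.getElem_set]
      unfold dpVec
      simp only [List.getElem_map, List.getElem_range, List.getElem_replicate]
      split_ifs with hie h3 <;>
        first
          | rfl
          | omega
          | (subst hie; simp [Dv])
  intro m
  induction m with
  | zero => intro _; simpa using hbase
  | succ t ih =>
    intro hlt
    rw [List.range'_concat, List.foldl_append, ih (by omega)]
    have e : 1 + 1 * t = t + 1 := by omega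
    simp only [List.foldl_cons, List.foldl_nil, e]
    exact stepA_dpVec A t (by omega)

theorem minkdp_eq_Dv (A : List Int) (hN : 0 < A.length) :
    min_k_dp A = Dv A (A.length - 1) := by
  show ((((List.range' 1 (A.length - 1)).foldl (pvStepA A)
      ((List.replicate A.length (none : Option Int)).set 0 (some 0))).getD (A.length - 1) none).getD 0)
      = Dv A (A.length - 1)
  rw [dpA_fold A hN (A.length - 1) (by omega)]
  rw [dpVec_getD_lt A (A.length - 1 + 1) (A.length - 1) (by omega) (by omega)]
  rfl

-- ---------- B side: feasibility tests Dv (N-1) ≤ k ----------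

theorem feas_key (A : List Int) (k : Int) (t : Nat) :
    ((List.range (t + 1)).any
      (fun j => decide (Dv A j ≤ k) && decide (pvCost A (t + 1) j ≤ k)))
      = decide (Dv A (t + 1) ≤ k) := by
  obtain ⟨m, hm, he⟩ := Dv_succ_eq A t
  obtain ⟨hmem, hmin⟩ := List.min?_eq_some_iff.mp hm
  rw [he]
  rcases h : decide (m ≤ k) with _ | _
  · -- m > k: every j has max (Dv j) cost > k
    simp only [decide_eq_false_iff_not, not_le] at h
    rw [List.any_eq_false]
    intro j hj
    have := hmin _ (List.mem_map.mpr ⟨j, hj, rfl⟩)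
    simp only [Bool.and_eq_true, decide_eq_true_eq, not_and, not_le]
    intro hDv
    have : k < max (Dv A j) (pvCost A (t + 1) j) := lt_of_lt_of_le h this
    omega
  · -- m ≤ k: the minimizing j witnesses the any
    simp only [decide_eq_true_eq] at h
    rw [List.any_eq_true]
    obtain ⟨j, hj, hjm⟩ := List.mem_map.mp hmem
    refine ⟨j, hj, ?_⟩
    have h1 : Dv A j ≤ k := le_trans (le_trans (le_max_left _ _) (le_of_eq hjm)) h
    have h2 : pvCost A (t + 1) j ≤ k := le_trans (le_trans (le_max_right _ _) (le_of_eq hjm)) h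
    simp [h1, h2]

def reachVec (A : List Int) (k : Int) (t : Nat) : List Bool :=
  (List.range t).map (fun i => decide (Dv A i ≤ k))

theorem reach_fold (A : List Int) (k : Int) (hk : 0 ≤ k) :
    ∀ m, (List.range' 1 m).foldl
      (fun r i => r ++ [(List.range i).any
        (fun j => r.getD j false && decide (pvCost A i j ≤ k))]) [true]
      = reachVec A k (m + 1) := by
  intro m
  induction m with
  | zero => simp [reachVec, List.range_succ, Dv, hk]
  | succ t ih =>
    rw [List.range'_concat, List.foldl_append, ih]
    have e : 1 + 1 * t = t + 1 := by omega
    simp only [List.foldl_cons, List.foldl_nil, e]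
    have hcongr : ((List.range (t + 1)).any
        (fun j => (reachVec A k (t + 1)).getD j false && decide (pvCost A (t + 1) j ≤ k)))
        = ((List.range (t + 1)).any
        (fun j => decide (Dv A j ≤ k) && decide (pvCost A (t + 1) j ≤ k))) := by
      apply PySem.List.any_congr_mem
      intro j hj
      have hjlt := List.mem_range.mp hj
      have : (reachVec A k (t + 1)).getD j false = decide (Dv A j ≤ k) := by
        unfold reachVec
        rw [List.getD_eq_getElem?_getD, List.getElem?_map, List.getElem?_range hjlt]
        rfl
      rw [this]
    rw [hcongr, feas_key]
    unfold reachVec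
    rw [List.range_succ (n := t + 1), List.map_append]
    rfl

theorem feasible_iff (A : List Int) (k : Int) (hN : 0 < A.length) (hk : 0 ≤ k) :
    pvFeasible A k = decide (Dv A (A.length - 1) ≤ k) := by
  show (((List.range' 1 (A.length - 1)).foldl
      (fun r i => r ++ [(List.range i).any
        (fun j => r.getD j false && decide (pvCost A i j ≤ k))]) [true]).getLast?.getD false)
      = decide (Dv A (A.length - 1) ≤ k)
  rw [reach_fold A k hk (A.length - 1)]
  unfold reachVec
  rw [List.getLast?_eq_getElem?]
  have hlen : ((List.range (A.length - 1 + 1)).map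
      (fun i => decide (Dv A i ≤ k))).length = A.length - 1 + 1 := by simp
  rw [hlen]
  simp [List.getElem?_map, List.getElem?_range]

theorem bsearch_eq (A : List Int) (t : Int)
    (hfeas : ∀ k, 0 ≤ k → (pvFeasible A k = decide (t ≤ k))) :
    ∀ n lo hi, (hi - lo).toNat ≤ n → 0 ≤ lo → lo ≤ t → t ≤ hi → pvBSearch A lo hi = t := by
  intro n
  induction n with
  | zero =>
    intro lo hi hfuel h0 hlt hth
    have : ¬ lo < hi := by omega
    rw [pvBSearch, dif_neg this]
    omega
  | succ n ih =>
    intro lo hi hfuel h0 hlt hth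
    by_cases h : lo < hi
    · rw [pvBSearch, dif_pos h]
      have hb := PySem.Int.floordiv_two_mid_bounds (le_of_lt h)
      have hmlt : PySem.Int.floordiv (lo + hi) 2 < hi := by
        rw [PySem.Int.floordiv_lt_iff_lt_mul (by omega)]; omega
      set mid := PySem.Int.floordiv (lo + hi) 2 with hmid
      have hk0 : 0 ≤ mid := by omega
      show (if pvFeasible A mid = true then pvBSearch A lo mid else pvBSearch A (mid + 1) hi) = t
      rw [hfeas mid hk0]
      by_cases ht : t ≤ mid
      · simp only [decide_eq_true_eq, ht, if_true]
        exact ih lo mid (by omega) h0 hlt ht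
      · have : decide (t ≤ mid) = false := by simp [ht]
        rw [this]
        simp only [Bool.false_eq_true, if_false]
        exact ih (mid + 1) hi (by omega) (by omega) (by omega) hth
    · rw [pvBSearch, dif_neg h]; omega

theorem Dv_le_hi (A : List Int) (hN : 0 < A.length) :
    Dv A (A.length - 1) ≤ ((A.length : Int) - 1) * (1 + |A.getD (A.length - 1) 0 - A.getD 0 0|) := by
  rcases Nat.lt_or_ge A.length 2 with h2 | h2
  · have h1 : A.length = 1 := by omega
    simp [h1, Dv]
  · obtain ⟨t, ht⟩ : ∃ t, A.length - 1 = t + 1 := ⟨A.length - 2, by omega⟩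
    rw [ht]
    obtain ⟨m, hm, he⟩ := Dv_succ_eq A t
    obtain ⟨-, hmin⟩ := List.min?_eq_some_iff.mp hm
    rw [he]
    have h0 : max (Dv A 0) (pvCost A (t + 1) 0) ∈
        (List.range (t + 1)).map (fun j => max (Dv A j) (pvCost A (t + 1) j)) :=
      List.mem_map.mpr ⟨0, List.mem_range.mpr (by omega), rfl⟩
    have := hmin _ h0
    have hmax : max (Dv A 0) (pvCost A (t + 1) 0) = pvCost A (t + 1) 0 := by
      have := pvCost_nonneg A (t + 1) 0 (by omega)
      simp [Dv]; omega
    rw [hmax] at this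
    have hsc : ((t + 1 : Nat) : Int) - ((0 : Nat) : Int) = (A.length : Int) - 1 := by
      push_cast; omega
    have hcost : pvCost A (t + 1) 0
        = ((A.length : Int) - 1) * (1 + |A.getD (t + 1) 0 - A.getD 0 0|) := by
      unfold pvCost
      rw [hsc]
    rw [← hcost]
    exact this

-- ===== VERDICT (by name: the statement is the Claim_ definition above) =====
theorem min_k_dp_spec : Claim_equal_min_k_dp := by
  intro A _ hpre
  have hN : 0 < A.length := List.length_pos_iff.mpr hpre
  show min_k_dp A = pvBSearch A 0 (((A.length : Int) - 1) * (1 + |A.getD (A.length - 1) 0 - A.getD 0 0|))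
  rw [minkdp_eq_Dv A hN]
  set t := Dv A (A.length - 1) with hdv
  have hfeas : ∀ k, 0 ≤ k → pvFeasible A k = decide (t ≤ k) := by
    intro k hk; rw [feasible_iff A k hN hk]
  refine (bsearch_eq A t hfeas
    ((((A.length : Int) - 1) * (1 + |A.getD (A.length - 1) 0 - A.getD 0 0|)) - 0).toNat
    0 _ (le_refl _) (le_refl _) (Dv_nonneg A _) (Dv_le_hi A hN)).symm
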